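-- pv_equiv track=rewrite | github.com/CrossLangNV/C4C_term_extraction | src/annotations.py | get_sentences_index
-- ===== SOURCE A (Python) =====
-- from typing import List, Tuple
--
-- def get_sentences_index( text:str )->List[ Tuple[ int, int ] ]:
--
--     '''
--     Helper function to find offsets of the sentences in a string (sentences are considered strings split via "\n")
--
--     :param text: String. String, for instance results of tika parser.
--     :return: List[ Tuple[ int, int ] ]. List with offsets of the sentences
--     '''
--
--     sentences_index=[]
--     position=0
--     for sentence in text.split( "\n" ):
--         if sentence:
--             begin_pos=position
--             end_pos=position+len( sentence )
--
--             #we don't want empty part to be included.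
--             indent_left=len( sentence) - len( sentence.lstrip() )
--             indent_right=len( sentence) - len( sentence.rstrip() )
--
--             #we are not interested in index of '  ' or '\t  '
--             if sentence.strip():
--                 sentences_index.append( (begin_pos+indent_left, end_pos-indent_right ) )
--             #+1 to account for the "\n" (stripped via .split( "\n" ))
--             position+=(len(sentence )+1)
--         else:
--             #to account for the 'empty' sentences ( i.e. "" )
--             position+=1
--
--     return sentences_index
-- ===== SOURCE B (Python) =====
-- from typing import List, Tuple
--
-- def get_sentences_index(text: str) -> List[Tuple[int, int]]:
--     '''One pass over the characters: track the first and last non-whitespace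
--     position of the current line; flush a span at each "\n" and at the end.'''
--     sentences_index = []
--     first = None
--     last = 0
--     for i, ch in enumerate(text):
--         if ch == '\n':
--             if first is not None:
--                 sentences_index.append((first, last + 1))
--             first = None
--             last = 0
--         elif not ch.isspace():
--             if first is None:
--                 first = i
--             last = i
--     if first is not None:
--         sentences_index.append((first, last + 1))
--     return sentences_index
-- ===== Notes on version B (the rewrite author's own statement) =====
-- stated objective: idiomatic
-- what changed: Replaces splitting on newline plus lstrip/rstrip length bookkeeping and a manually accumulated position with a single enumerate pass that tracks the first and last non-whitespace index of the current line and flushes a span at each newline.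
import Mathlib
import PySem

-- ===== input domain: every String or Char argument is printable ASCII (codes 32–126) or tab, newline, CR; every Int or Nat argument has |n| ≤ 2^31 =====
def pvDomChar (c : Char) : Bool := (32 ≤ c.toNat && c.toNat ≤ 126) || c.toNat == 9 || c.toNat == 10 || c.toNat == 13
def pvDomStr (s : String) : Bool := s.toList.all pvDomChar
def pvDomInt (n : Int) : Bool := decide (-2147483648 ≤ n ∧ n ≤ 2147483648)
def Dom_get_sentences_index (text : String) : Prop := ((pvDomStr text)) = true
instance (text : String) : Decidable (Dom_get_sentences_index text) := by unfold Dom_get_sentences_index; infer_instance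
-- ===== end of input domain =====

-- B replaces split("\n") + lstrip/rstrip length bookkeeping + a manual position counter
-- by one idiomatic enumerate pass tracking the first/last non-whitespace index per line.

-- ===== PORT A =====
-- A's loop body over the pieces of text.split("\n"): state = (sentences_index, position)
def pvAStep (st : List (Int × Int) × Int) (sentence : List Char) : List (Int × Int) × Int :=
  if sentence ≠ [] then
    let begin_pos : Int := st.2
    let end_pos : Int := st.2 + sentence.length
    let indent_left : Int := (sentence.length : Int) - ((PySem.Chars.lstrip sentence).length : Int)
    let indent_right : Int := (sentence.length : Int) - ((PySem.Chars.rstrip sentence).length : Int)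
    (if PySem.Chars.strip sentence ≠ [] then
        st.1 ++ [(begin_pos + indent_left, end_pos - indent_right)]
      else st.1,
     st.2 + (sentence.length : Int) + 1)
  else
    (st.1, st.2 + 1)

def get_sentences_index (text : String) : List (Int × Int) :=
  ((PySem.Chars.splitOn text.toList ['\n']).foldl pvAStep ([], 0)).1

-- ===== PORT B =====
-- Source B's flush: append the pending span (first, last+1) if the line had content
def pvFlush (res : List (Int × Int)) (first : Option Int) (last : Int) : List (Int × Int) :=
  match first with
  | some f => res ++ [(f, last + 1)]
  | none => res

-- Source B's loop body over enumerate(text): state = (sentences_index, first, last)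
def pvBStep (st : List (Int × Int) × Option Int × Int) (p : Int × Char) :
    List (Int × Int) × Option Int × Int :=
  if p.2 = '\n' then
    (pvFlush st.1 st.2.1 st.2.2, none, 0)
  else if PySem.Chars.isspace p.2 then st
  else
    match st.2.1 with
    | none => (st.1, some p.1, p.1)
    | some f => (st.1, some f, p.1)

def get_sentences_index_alt (text : String) : List (Int × Int) :=
  let st := (PySem.List.enumerate text.toList 0).foldl pvBStep ([], none, 0)
  pvFlush st.1 st.2.1 st.2.2

-- ===== PRECONDITION & SPEC =====
def Spec_get_sentences_index (text : String) (out : List (Int × Int)) : Prop := out = get_sentences_index_alt text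
instance (text : String) (out : List (Int × Int)) : Decidable (Spec_get_sentences_index text out) := by unfold Spec_get_sentences_index; infer_instance

-- ===== CLAIM (what is proved, stated in full; the proofs are below) =====
def Claim_equal_get_sentences_index : Prop := ∀ (text : String), Dom_get_sentences_index text → Spec_get_sentences_index text (get_sentences_index text)

-- ===== LEMMAS AND PROOFS =====

-- pvSplitNl cs = cs.split("\n") written structurally (proved equal to PySem.Chars.splitOn below)
def pvSplitNl : List Char → List (List Char)
  | [] => [[]]
  | c :: cs =>
    if c = '\n' then [] :: pvSplitNl cs
    else
      match pvSplitNl cs with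
      | [] => [[c]]
      | l :: ls => (c :: l) :: ls

def pvConsHd (x : List Char) : List (List Char) → List (List Char)
  | [] => [x]
  | l :: ls => (x ++ l) :: ls

def pvFinish (st : List (Int × Int) × Option Int × Int) : List (Int × Int) :=
  pvFlush st.1 st.2.1 st.2.2

theorem pvTriple_ext {a : List (Int × Int)} {o o' : Option Int} {x y : Int}
    (h2 : o = o') (h3 : x = y) : ((a, o, x) : List (Int × Int) × Option Int × Int) = (a, o', y) := by
  subst h2; subst h3; rfl

def pvIL (l : List Char) : Int := (l.length : Int) - ((PySem.Chars.lstrip l).length : Int)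
def pvIR (l : List Char) : Int := (l.length : Int) - ((PySem.Chars.rstrip l).length : Int)

theorem pvSplitNl_ne_nil (cs : List Char) : pvSplitNl cs ≠ [] := by
  cases cs with
  | nil => simp [pvSplitNl]
  | cons c cs =>
    simp only [pvSplitNl]
    split
    · simp
    · cases h : pvSplitNl cs <;> simp

theorem pvGo_eq (fuel : Nat) : ∀ (cs cur : List Char) (acc : List (List Char)),
    cs.length < fuel →
    PySem.Chars.splitOn.go ['\n'] fuel cs cur acc = acc.reverse ++ pvConsHd cur.reverse (pvSplitNl cs) := by
  induction fuel with
  | zero => intro cs cur acc h; omega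
  | succ n ih =>
    intro cs cur acc h
    cases cs with
    | nil =>
      simp [PySem.Chars.splitOn.go, pvSplitNl, pvConsHd]
    | cons c cs =>
      by_cases hc : c = '\n'
      · subst hc
        have h1 : PySem.Chars.splitOn.go ['\n'] (n+1) ('\n' :: cs) cur acc
            = PySem.Chars.splitOn.go ['\n'] n cs [] (cur.reverse :: acc) := by
          simp [PySem.Chars.splitOn.go]
        rw [h1, ih cs [] (cur.reverse :: acc) (by simpa using h)]
        cases h3 : pvSplitNl cs with
        | nil => exact absurd h3 (pvSplitNl_ne_nil cs)
        | cons l ls => simp [pvSplitNl, pvConsHd, h3]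
      · have hc' : ¬ ('\n' = c) := fun he => hc he.symm
        have h1 : PySem.Chars.splitOn.go ['\n'] (n+1) (c :: cs) cur acc
            = PySem.Chars.splitOn.go ['\n'] n cs (c :: cur) acc := by
          simp [PySem.Chars.splitOn.go, hc']
        rw [h1, ih cs (c :: cur) acc (by simpa using h)]
        cases h2 : pvSplitNl cs with
        | nil => exact absurd h2 (pvSplitNl_ne_nil cs)
        | cons l ls => simp [pvSplitNl, hc, h2, pvConsHd]

theorem pvSplitOn_eq (cs : List Char) : PySem.Chars.splitOn cs ['\n'] = pvSplitNl cs := by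
  rw [PySem.Chars.splitOn, pvGo_eq (cs.length + 1) cs [] [] (by omega)]
  cases h : pvSplitNl cs with
  | nil => exact absurd h (pvSplitNl_ne_nil cs)
  | cons l ls => simp [pvConsHd]

theorem pvSplitNl_noNl (cs : List Char) (h : '\n' ∉ cs) : pvSplitNl cs = [cs] := by
  induction cs with
  | nil => rfl
  | cons c t ih =>
    simp only [List.mem_cons, not_or] at h
    have hc : ¬ (c = '\n') := fun he => h.1 he.symm
    simp [pvSplitNl, hc, ih h.2]

theorem pvSplitNl_append (l rest : List Char) (h : '\n' ∉ l) :
    pvSplitNl (l ++ '\n' :: rest) = l :: pvSplitNl rest := by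
  induction l with
  | nil => simp [pvSplitNl]
  | cons c t ih =>
    simp only [List.mem_cons, not_or] at h
    have hc : ¬ (c = '\n') := fun he => h.1 he.symm
    simp only [List.cons_append, pvSplitNl, if_neg hc, ih h.2]

theorem pvFirstNl (cs : List Char) (h : '\n' ∈ cs) :
    ∃ l rest, cs = l ++ '\n' :: rest ∧ '\n' ∉ l := by
  induction cs with
  | nil => simp at h
  | cons c t ih =>
    by_cases hc : c = '\n'
    · exact ⟨[], t, by simp [hc], by simp⟩
    · have ht : '\n' ∈ t := by
        rcases List.mem_cons.mp h with h1 | h1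
        · exact absurd h1.symm hc
        · exact h1
      obtain ⟨l, rest, hEq, hNl⟩ := ih ht
      have hc' : ¬ ('\n' = c) := fun he => hc he.symm
      exact ⟨c :: l, rest, by simp [hEq], by simp [hNl, hc']⟩

-- whitespace structure of a line
theorem pvRstrip_nil_iff (l : List Char) :
    PySem.Chars.rstrip l = [] ↔ ∀ x ∈ l, PySem.Chars.isspace x := by
  simp [PySem.Chars.rstrip, List.reverse_eq_nil_iff, List.dropWhile_eq_nil_iff]

theorem pvLstrip_cons (c : Char) (t : List Char) :
    PySem.Chars.lstrip (c :: t) =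
      if PySem.Chars.isspace c then PySem.Chars.lstrip t else c :: t := by
  simp [PySem.Chars.lstrip, List.dropWhile_cons]

theorem pvWs_dropWhile_iff (l : List Char) :
    (∀ x ∈ List.dropWhile PySem.Chars.isspace l, PySem.Chars.isspace x)
      ↔ ∀ x ∈ l, PySem.Chars.isspace x := by
  induction l with
  | nil => simp
  | cons c t ih =>
    by_cases hc : PySem.Chars.isspace c
    · simpa [List.dropWhile_cons, hc] using ih
    · simp [hc]

theorem pvStrip_nil_iff (l : List Char) :
    PySem.Chars.strip l = [] ↔ ∀ x ∈ l, PySem.Chars.isspace x := by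
  rw [PySem.Chars.strip, pvRstrip_nil_iff]
  simpa [PySem.Chars.lstrip] using pvWs_dropWhile_iff l

theorem pvStrip_cons_ws (c : Char) (t : List Char) (hc : PySem.Chars.isspace c) :
    (PySem.Chars.strip (c :: t) = []) ↔ (PySem.Chars.strip t = []) := by
  rw [pvStrip_nil_iff, pvStrip_nil_iff]
  constructor
  · intro h x hx; exact h x (by simp [hx])
  · intro h x hx
    rcases List.mem_cons.mp hx with h1 | h1
    · subst h1; exact hc
    · exact h x h1

theorem pvStrip_cons_ne (c : Char) (t : List Char) (hc : ¬ PySem.Chars.isspace c) :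
    ¬ PySem.Chars.strip (c :: t) = [] := by
  rw [pvStrip_nil_iff]
  intro h; exact hc (h c (by simp))

theorem pvRstrip_cons_of_nws (c : Char) (t : List Char)
    (ht : ¬ ∀ x ∈ t, PySem.Chars.isspace x) :
    PySem.Chars.rstrip (c :: t) = c :: PySem.Chars.rstrip t := by
  have hne : ¬ (List.dropWhile PySem.Chars.isspace t.reverse).isEmpty := by
    simp only [List.isEmpty_iff, List.dropWhile_eq_nil_iff]
    intro hall
    exact ht (fun x hx => hall x (by simpa using hx))
  have hrev : (c :: t).reverse = t.reverse ++ [c] := by simp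
  rw [PySem.Chars.rstrip, hrev, List.dropWhile_append, if_neg hne]
  simp [PySem.Chars.rstrip]

theorem pvRstrip_cons_of_allws (c : Char) (t : List Char)
    (ht : ∀ x ∈ t, PySem.Chars.isspace x) :
    PySem.Chars.rstrip (c :: t) = if PySem.Chars.isspace c then [] else [c] := by
  have hnil : List.dropWhile PySem.Chars.isspace t.reverse = [] := by
    rw [List.dropWhile_eq_nil_iff]
    intro x hx; exact ht x (by simpa using hx)
  have hrev : (c :: t).reverse = t.reverse ++ [c] := by simp
  rw [PySem.Chars.rstrip, hrev, List.dropWhile_append, if_pos (by simp [hnil])]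
  by_cases hc : PySem.Chars.isspace c <;> simp [hc]

theorem pvIR_cons_of_nws (c : Char) (t : List Char)
    (ht : ¬ PySem.Chars.strip t = []) : pvIR (c :: t) = pvIR t := by
  have ht' : ¬ ∀ x ∈ t, PySem.Chars.isspace x := by
    rw [pvStrip_nil_iff] at ht; exact ht
  rw [pvIR, pvIR, pvRstrip_cons_of_nws c t ht']
  simp only [List.length_cons]
  push_cast; ring

theorem pvIR_cons_allws (c : Char) (t : List Char) (hc : ¬ PySem.Chars.isspace c)
    (ht : PySem.Chars.strip t = []) : pvIR (c :: t) = t.length := by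
  have ht' : ∀ x ∈ t, PySem.Chars.isspace x := by
    rw [pvStrip_nil_iff] at ht; exact ht
  rw [pvIR, pvRstrip_cons_of_allws c t ht', if_neg hc]
  simp

-- processing one '\n'-free line with a pending first
theorem pvLineSome (l : List Char) (hNl : '\n' ∉ l) :
    ∀ (p f last0 : Int) (res : List (Int × Int)),
    List.foldl pvBStep (res, some f, last0) (PySem.List.enumerate l p) =
      (res, some f,
        if PySem.Chars.strip l = [] then last0 else p + l.length - pvIR l - 1) := by
  induction l with
  | nil => intro p f last0 res; simp [PySem.List.enumerate, pvStrip_nil_iff]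
  | cons c t ih =>
    intro p f last0 res
    simp only [List.mem_cons, not_or] at hNl
    have hcn : ¬ ((p, c).2 = '\n') := fun he => hNl.1 he.symm
    rw [PySem.List.enumerate_cons, List.foldl_cons]
    by_cases hc : PySem.Chars.isspace c
    · have hstep : pvBStep (res, some f, last0) (p, c) = (res, some f, last0) := by
        simp [pvBStep, hcn, hc]
      rw [hstep, ih hNl.2]
      by_cases h1 : PySem.Chars.strip t = []
      · rw [if_pos h1, if_pos ((pvStrip_cons_ws c t hc).mpr h1)]
      · rw [if_neg h1, if_neg (fun h => h1 ((pvStrip_cons_ws c t hc).mp h)),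
          pvIR_cons_of_nws c t h1]
        exact pvTriple_ext rfl (by simp only [List.length_cons]; push_cast; ring)
    · have hstep : pvBStep (res, some f, last0) (p, c) = (res, some f, p) := by
        simp [pvBStep, hcn, hc]
      rw [hstep, ih hNl.2]
      rw [if_neg (pvStrip_cons_ne c t hc)]
      by_cases h1 : PySem.Chars.strip t = []
      · rw [if_pos h1, pvIR_cons_allws c t hc h1]
        exact pvTriple_ext rfl (by simp only [List.length_cons]; push_cast; ring)
      · rw [if_neg h1, pvIR_cons_of_nws c t h1]
        exact pvTriple_ext rfl (by simp only [List.length_cons]; push_cast; ring)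

-- processing one '\n'-free line with nothing pending
theorem pvLineNone (l : List Char) (hNl : '\n' ∉ l) :
    ∀ (p last0 : Int) (res : List (Int × Int)),
    List.foldl pvBStep (res, none, last0) (PySem.List.enumerate l p) =
      (if PySem.Chars.strip l = [] then (res, none, last0)
       else (res, some (p + pvIL l), p + l.length - pvIR l - 1)) := by
  induction l with
  | nil => intro p last0 res; simp [PySem.List.enumerate, pvStrip_nil_iff]
  | cons c t ih =>
    intro p last0 res
    simp only [List.mem_cons, not_or] at hNl
    have hcn : ¬ ((p, c).2 = '\n') := fun he => hNl.1 he.symm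
    rw [PySem.List.enumerate_cons, List.foldl_cons]
    by_cases hc : PySem.Chars.isspace c
    · have hstep : pvBStep (res, none, last0) (p, c) = (res, none, last0) := by
        simp [pvBStep, hcn, hc]
      rw [hstep, ih hNl.2]
      by_cases h1 : PySem.Chars.strip t = []
      · rw [if_pos h1, if_pos ((pvStrip_cons_ws c t hc).mpr h1)]
      · have hL : pvIL (c :: t) = pvIL t + 1 := by
          rw [pvIL, pvIL, pvLstrip_cons, if_pos hc]
          simp only [List.length_cons]
          push_cast; ring
        rw [if_neg h1, if_neg (fun h => h1 ((pvStrip_cons_ws c t hc).mp h)),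
          pvIR_cons_of_nws c t h1, hL]
        exact pvTriple_ext (congrArg some (by ring)) (by simp only [List.length_cons]; push_cast; ring)
    · have hstep : pvBStep (res, none, last0) (p, c) = (res, some p, p) := by
        simp [pvBStep, hcn, hc]
      rw [hstep, pvLineSome t hNl.2]
      rw [if_neg (pvStrip_cons_ne c t hc)]
      have hL : pvIL (c :: t) = 0 := by
        rw [pvIL, pvLstrip_cons, if_neg hc]
        simp
      rw [hL]
      by_cases h1 : PySem.Chars.strip t = []
      · rw [if_pos h1, pvIR_cons_allws c t hc h1]
        exact pvTriple_ext (congrArg some (by ring)) (by simp only [List.length_cons]; push_cast; ring)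
      · rw [if_neg h1, pvIR_cons_of_nws c t h1]
        exact pvTriple_ext (congrArg some (by ring)) (by simp only [List.length_cons]; push_cast; ring)

theorem pvAStep_eq (res : List (Int × Int)) (p : Int) (l : List Char) :
    pvAStep (res, p) l =
      ((if PySem.Chars.strip l = [] then res else res ++ [(p + pvIL l, p + l.length - pvIR l)]),
       p + l.length + 1) := by
  cases l with
  | nil =>
    rw [if_pos (by simp [pvStrip_nil_iff])]
    simp [pvAStep]
  | cons c t =>
    by_cases hs : PySem.Chars.strip (c :: t) = []
    · simp [pvAStep, hs]
    · rw [if_neg hs]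
      simp only [pvAStep, if_pos hs, pvIL, pvIR]
      simp

theorem pvFlush_of_line (res : List (Int × Int)) (p : Int) (l : List Char) (last0 : Int) :
    pvFinish (if PySem.Chars.strip l = [] then ((res, none, last0) : List (Int × Int) × Option Int × Int)
       else (res, some (p + pvIL l), p + l.length - pvIR l - 1)) =
    (if PySem.Chars.strip l = [] then res else res ++ [(p + pvIL l, p + l.length - pvIR l)]) := by
  by_cases hs : PySem.Chars.strip l = []
  · simp [hs, pvFinish, pvFlush]
  · simp only [if_neg hs, pvFinish, pvFlush]
    have : p + (l.length : Int) - pvIR l - 1 + 1 = p + l.length - pvIR l := by ring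
    rw [this]

theorem pvMain (n : Nat) : ∀ (cs : List Char), cs.length ≤ n →
    ∀ (p last0 : Int) (res : List (Int × Int)),
    pvFinish (List.foldl pvBStep (res, none, last0) (PySem.List.enumerate cs p)) =
    ((pvSplitNl cs).foldl pvAStep (res, p)).1 := by
  induction n with
  | zero =>
    intro cs hlen p last0 res
    cases cs with
    | nil => simp [PySem.List.enumerate, pvSplitNl, pvAStep, pvFinish, pvFlush]
    | cons c t => exact absurd hlen (by simp)
  | succ n ih =>
    intro cs hlen p last0 res
    by_cases hmem : '\n' ∈ cs
    · obtain ⟨l, rest, hEq, hNl⟩ := pvFirstNl cs hmem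
      subst hEq
      rw [pvSplitNl_append l rest hNl]
      have hEnum : PySem.List.enumerate (l ++ '\n' :: rest) p
          = PySem.List.enumerate l p ++ (p + l.length, '\n') :: PySem.List.enumerate rest (p + l.length + 1) := by
        rw [PySem.List.enumerate_append, PySem.List.enumerate_cons]
      have hNlStep : ∀ (st : List (Int × Int) × Option Int × Int),
          pvBStep st (p + l.length, '\n') = (pvFinish st, none, 0) := by
        intro st; simp [pvBStep, pvFinish]
      have hrest : rest.length ≤ n := by
        have := hlen; simp [List.length_append] at this; omega
      rw [hEnum, List.foldl_append, List.foldl_cons, pvLineNone l hNl, hNlStep,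
        List.foldl_cons, pvAStep_eq res p l]
      have := ih rest hrest (p + l.length + 1) 0
        (if PySem.Chars.strip l = [] then res else res ++ [(p + pvIL l, p + (l.length : Int) - pvIR l)])
      rw [← this]
      rw [← pvFlush_of_line res p l last0]
    · rw [pvSplitNl_noNl cs hmem, List.foldl_cons, List.foldl_nil, pvLineNone cs hmem,
        pvAStep_eq res p cs, ← pvFlush_of_line res p cs last0]

-- ===== VERDICT (by name: the statement is the Claim_ definition above) =====
theorem get_sentences_index_spec : Claim_equal_get_sentences_index := by
  intro text _
  show get_sentences_index text = get_sentences_index_alt text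
  rw [get_sentences_index, get_sentences_index_alt, pvSplitOn_eq]
  exact (pvMain text.toList.length text.toList le_rfl 0 0 []).symm
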